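-- pv_equiv track=rewrite | github.com/yanfrimmel/safer | safer.py | _calculate_stats_from_results
-- ===== SOURCE A (Python) =====
-- def _calculate_stats_from_results(results):
--     """Calculate stats from analysis results"""
--     stats = {
--         'malicious': 0,
--         'suspicious': 0,
--         'harmless': 0,
--         'undetected': 0
--     }
--
--     for result in results.values():
--         category = result.get('category')
--         if category == 'malicious':
--             stats['malicious'] += 1
--         elif category == 'suspicious':
--             stats['suspicious'] += 1
--         elif category == 'harmless':
--             stats['harmless'] += 1
--         else:
--             stats['undetected'] += 1
--
--     return stats
-- ===== SOURCE B (Python) =====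
-- def _calculate_stats_from_results(results):
--     """Calculate stats from analysis results"""
--     remaining = [r.get('category') for r in results.values()]
--     stats = {}
--     total = len(remaining)
--     for label in ('malicious', 'suspicious', 'harmless'):
--         remaining = [c for c in remaining if c != label]
--         stats[label] = total - len(remaining)
--         total = len(remaining)
--     stats['undetected'] = total
--     return stats
-- ===== Notes on version B (the rewrite author's own statement) =====
-- stated objective: alternative
-- what changed: Replaces A's per-element if/elif classification that increments a stats dict with a successive sieve: three staged filtering passes over the category list, each bucket count derived as the length drop of that pass, and 'undetected' is simply what survives all sieves.
import Mathlib
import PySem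

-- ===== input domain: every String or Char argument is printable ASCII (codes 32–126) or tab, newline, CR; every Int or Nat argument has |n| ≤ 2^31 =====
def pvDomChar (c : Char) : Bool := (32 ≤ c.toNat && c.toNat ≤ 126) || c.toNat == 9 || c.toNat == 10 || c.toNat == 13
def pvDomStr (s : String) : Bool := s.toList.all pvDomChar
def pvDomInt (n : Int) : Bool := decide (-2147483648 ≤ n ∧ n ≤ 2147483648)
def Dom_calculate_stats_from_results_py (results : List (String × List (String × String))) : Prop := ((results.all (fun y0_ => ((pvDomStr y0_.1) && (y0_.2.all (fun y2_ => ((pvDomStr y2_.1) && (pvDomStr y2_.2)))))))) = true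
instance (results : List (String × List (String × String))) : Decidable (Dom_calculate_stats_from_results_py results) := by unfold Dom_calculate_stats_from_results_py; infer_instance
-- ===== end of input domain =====

-- B replaces A's per-element if/elif classification loop by a successive sieve: three staged
-- filtering passes, each bucket's count read off as that pass's length drop, 'undetected' = survivors (objective: alternative).

-- ===== PORT A =====
def calculate_stats_from_results_py (results : List (String × List (String × String))) : List (String × Int) :=
  let stats : PySem.Dict String Int :=
    PySem.Dict.ofList [("malicious", 0), ("suspicious", 0), ("harmless", 0), ("undetected", 0)]
  let stats := results.foldl (fun stats result =>
    let category := PySem.Dict.get? (PySem.Dict.ofList result.2) "category"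
    if category = some "malicious" then stats.modify "malicious" 0 (· + 1)
    else if category = some "suspicious" then stats.modify "suspicious" 0 (· + 1)
    else if category = some "harmless" then stats.modify "harmless" 0 (· + 1)
    else stats.modify "undetected" 0 (· + 1)) stats
  stats.items

-- ===== PORT B =====
def calculate_stats_from_results_py_alt (results : List (String × List (String × String))) : List (String × Int) :=
  let remaining : List (Option String) := results.map (fun r => PySem.Dict.get? (PySem.Dict.ofList r.2) "category")
  let stats : PySem.Dict String Int := PySem.Dict.empty
  let total : Int := remaining.length
  let st := ["malicious", "suspicious", "harmless"].foldl
    (fun (st : List (Option String) × PySem.Dict String Int × Int) label =>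
      let remaining := st.1.filter (fun c => c ≠ some label)
      let stats := st.2.1.insert label (st.2.2 - remaining.length)
      (remaining, stats, (remaining.length : Int)))
    (remaining, stats, total)
  (st.2.1.insert "undetected" st.2.2).items

-- ===== PRECONDITION & SPEC =====
def Spec_calculate_stats_from_results_py (results : List (String × List (String × String))) (out : List (String × Int)) : Prop := out = calculate_stats_from_results_py_alt results
instance (results : List (String × List (String × String))) (out : List (String × Int)) : Decidable (Spec_calculate_stats_from_results_py results out) := by unfold Spec_calculate_stats_from_results_py; infer_instance

-- ===== CLAIM (what is proved, stated in full; the proofs are below) =====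
def Claim_equal_calculate_stats_from_results_py : Prop := ∀ (results : List (String × List (String × String))), Dom_calculate_stats_from_results_py results → Spec_calculate_stats_from_results_py results (calculate_stats_from_results_py results)

-- ===== LEMMAS AND PROOFS =====

-- Invariant of A's loop: after folding the list, the stats dict is the four-key literal
-- whose values are the starting values plus the category counts of the list.
lemma stats_fold_invariant (l : List (String × List (String × String))) : ∀ (m s h u : Int),
    (l.foldl (fun (stats : PySem.Dict String Int) result =>
        let category := PySem.Dict.get? (PySem.Dict.ofList result.2) "category"
        if category = some "malicious" then stats.modify "malicious" 0 (· + 1)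
        else if category = some "suspicious" then stats.modify "suspicious" 0 (· + 1)
        else if category = some "harmless" then stats.modify "harmless" 0 (· + 1)
        else stats.modify "undetected" 0 (· + 1))
      (PySem.Dict.ofList [("malicious", m), ("suspicious", s), ("harmless", h), ("undetected", u)])).items
    = (let cats := l.map (fun r => PySem.Dict.get? (PySem.Dict.ofList r.2) "category")
       [("malicious", m + cats.count (some "malicious")),
        ("suspicious", s + cats.count (some "suspicious")),
        ("harmless", h + cats.count (some "harmless")),
        ("undetected", u + ((cats.length : Int) - cats.count (some "malicious") - cats.count (some "suspicious") - cats.count (some "harmless")))]) := by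
  induction l with
  | nil =>
      intro m s h u
      simp [PySem.Dict.ofList, PySem.Dict.update, PySem.Dict.empty, PySem.Dict.insert, PySem.Dict.contains]
  | cons p t ih =>
      intro m s h u
      simp only [List.foldl_cons]
      by_cases hm : PySem.Dict.get? (PySem.Dict.ofList p.2) "category" = some "malicious"
      · rw [show (let category := PySem.Dict.get? (PySem.Dict.ofList p.2) "category"
              if category = some "malicious" then (PySem.Dict.ofList [("malicious", m), ("suspicious", s), ("harmless", h), ("undetected", u)]).modify "malicious" 0 (· + 1)
              else if category = some "suspicious" then (PySem.Dict.ofList [("malicious", m), ("suspicious", s), ("harmless", h), ("undetected", u)]).modify "suspicious" 0 (· + 1)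
              else if category = some "harmless" then (PySem.Dict.ofList [("malicious", m), ("suspicious", s), ("harmless", h), ("undetected", u)]).modify "harmless" 0 (· + 1)
              else (PySem.Dict.ofList [("malicious", m), ("suspicious", s), ("harmless", h), ("undetected", u)]).modify "undetected" 0 (· + 1))
            = PySem.Dict.ofList [("malicious", m + 1), ("suspicious", s), ("harmless", h), ("undetected", u)] by
          simp only [hm]
          simp [PySem.Dict.modify, PySem.Dict.ofList, PySem.Dict.update, PySem.Dict.empty, PySem.Dict.insert, PySem.Dict.contains, PySem.Dict.getD, PySem.Dict.get?]]
        rw [ih]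
        simp [hm]
        omega
      · by_cases hs : PySem.Dict.get? (PySem.Dict.ofList p.2) "category" = some "suspicious"
        · rw [show (let category := PySem.Dict.get? (PySem.Dict.ofList p.2) "category"
                if category = some "malicious" then (PySem.Dict.ofList [("malicious", m), ("suspicious", s), ("harmless", h), ("undetected", u)]).modify "malicious" 0 (· + 1)
                else if category = some "suspicious" then (PySem.Dict.ofList [("malicious", m), ("suspicious", s), ("harmless", h), ("undetected", u)]).modify "suspicious" 0 (· + 1)
                else if category = some "harmless" then (PySem.Dict.ofList [("malicious", m), ("suspicious", s), ("harmless", h), ("undetected", u)]).modify "harmless" 0 (· + 1)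
                else (PySem.Dict.ofList [("malicious", m), ("suspicious", s), ("harmless", h), ("undetected", u)]).modify "undetected" 0 (· + 1))
              = PySem.Dict.ofList [("malicious", m), ("suspicious", s + 1), ("harmless", h), ("undetected", u)] by
            simp only [hs]
            simp [hm, PySem.Dict.modify, PySem.Dict.ofList, PySem.Dict.update, PySem.Dict.empty, PySem.Dict.insert, PySem.Dict.contains, PySem.Dict.getD, PySem.Dict.get?]]
          rw [ih]
          simp [hs]
          omega
        · by_cases hh : PySem.Dict.get? (PySem.Dict.ofList p.2) "category" = some "harmless"
          · rw [show (let category := PySem.Dict.get? (PySem.Dict.ofList p.2) "category"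
                  if category = some "malicious" then (PySem.Dict.ofList [("malicious", m), ("suspicious", s), ("harmless", h), ("undetected", u)]).modify "malicious" 0 (· + 1)
                  else if category = some "suspicious" then (PySem.Dict.ofList [("malicious", m), ("suspicious", s), ("harmless", h), ("undetected", u)]).modify "suspicious" 0 (· + 1)
                  else if category = some "harmless" then (PySem.Dict.ofList [("malicious", m), ("suspicious", s), ("harmless", h), ("undetected", u)]).modify "harmless" 0 (· + 1)
                  else (PySem.Dict.ofList [("malicious", m), ("suspicious", s), ("harmless", h), ("undetected", u)]).modify "undetected" 0 (· + 1))
                = PySem.Dict.ofList [("malicious", m), ("suspicious", s), ("harmless", h + 1), ("undetected", u)] by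
              simp only [hh]
              simp [hm, hs, PySem.Dict.modify, PySem.Dict.ofList, PySem.Dict.update, PySem.Dict.empty, PySem.Dict.insert, PySem.Dict.contains, PySem.Dict.getD, PySem.Dict.get?]]
            rw [ih]
            simp [hm, hs, hh]
            omega
          · rw [show (let category := PySem.Dict.get? (PySem.Dict.ofList p.2) "category"
                  if category = some "malicious" then (PySem.Dict.ofList [("malicious", m), ("suspicious", s), ("harmless", h), ("undetected", u)]).modify "malicious" 0 (· + 1)
                  else if category = some "suspicious" then (PySem.Dict.ofList [("malicious", m), ("suspicious", s), ("harmless", h), ("undetected", u)]).modify "suspicious" 0 (· + 1)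
                  else if category = some "harmless" then (PySem.Dict.ofList [("malicious", m), ("suspicious", s), ("harmless", h), ("undetected", u)]).modify "harmless" 0 (· + 1)
                  else (PySem.Dict.ofList [("malicious", m), ("suspicious", s), ("harmless", h), ("undetected", u)]).modify "undetected" 0 (· + 1))
                = PySem.Dict.ofList [("malicious", m), ("suspicious", s), ("harmless", h), ("undetected", u + 1)] by
              simp only [if_neg hm, if_neg hs, if_neg hh]
              simp [PySem.Dict.modify, PySem.Dict.ofList, PySem.Dict.update, PySem.Dict.empty, PySem.Dict.insert, PySem.Dict.contains, PySem.Dict.getD, PySem.Dict.get?]]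
            rw [ih]
            simp [hm, hs, hh]
            omega

-- The three sieve passes: each pass's length drop is exactly the count of the label it removes,
-- and the survivors number the rest (all quantities in Int; stated in simp-normal form so the
-- final proof can cite it directly).
lemma sieve_lengths (l : List (Option String)) :
    ((l.filter (fun c => !decide (c = some "malicious"))).length : Int)
        = (l.length : Int) - l.count (some "malicious")
    ∧ ((l.filter (fun a => !decide (a = some "suspicious") && !decide (a = some "malicious"))).length : Int)
        = (l.length : Int) - l.count (some "malicious") - l.count (some "suspicious")
    ∧ ((l.filter (fun a => !decide (a = some "harmless") && (!decide (a = some "suspicious") && !decide (a = some "malicious")))).length : Int)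
        = (l.length : Int) - l.count (some "malicious") - l.count (some "suspicious") - l.count (some "harmless") := by
  induction l with
  | nil => simp
  | cons a t ih =>
      obtain ⟨i1, i2, i3⟩ := ih
      by_cases hm : a = some "malicious"
      · simp [List.filter_cons, List.count_cons, hm, i1, i2, i3]
      · by_cases hs : a = some "suspicious"
        · simp [List.filter_cons, List.count_cons, hm, hs, i1, i2, i3]; omega
        · by_cases hh : a = some "harmless"
          · simp [List.filter_cons, List.count_cons, hm, hs, hh, i1, i2, i3]; omega
          · simp [List.filter_cons, List.count_cons, hm, hs, hh, i1, i2, i3]; omega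

-- ===== VERDICT (by name: the statement is the Claim_ definition above) =====
theorem calculate_stats_from_results_py_spec : Claim_equal_calculate_stats_from_results_py := by
  intro results _
  unfold Spec_calculate_stats_from_results_py calculate_stats_from_results_py calculate_stats_from_results_py_alt
  rw [stats_fold_invariant]
  simp only [List.foldl_cons, List.foldl_nil]
  simp [PySem.Dict.insert, PySem.Dict.empty, PySem.Dict.contains]
  obtain ⟨i1, i2, i3⟩ := sieve_lengths (results.map (fun r => PySem.Dict.get? (PySem.Dict.ofList r.2) "category"))
  simp only [List.length_map] at i1 i2 i3
  refine ⟨by omega, by omega, by omega, by omega⟩
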